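-- pv_equiv track=rewrite | github.com/Python-study-f/Algorithm-study_1H | Algorithm_2021/April_2021/210411/72411_Menu_Manual/72411_210407_ohzz.py | solution
-- ===== SOURCE A (Python) =====
-- import collections
--
-- def comb(lst, n):
--     res = []
--     if n > len(lst):
--         return res
--     if n == 1:
--         for i in lst:
--             res.append([i])
--     elif n > 1:
--         for i in range(len(lst) - n + 1):
--             for tmp in comb(lst[i + 1 :], n - 1):
--                 res.append([lst[i]] + tmp)
--     return res
--
-- def solution(orders, course):
--     answer = []
--     for c in course:
--         tmp = []
--         for order in orders:
--             for i in comb(order, c):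
--                 i.sort()
--                 tmp.append("".join(i))
--         tmp = collections.Counter(tmp).most_common()
--         for key, value in tmp:
--             if value >= 2 and tmp[0][1] == value:
--                 answer.append(key)
--     answer.sort()
--     return answer
-- ===== SOURCE B (Python) =====
-- import collections
--
--
-- def _nck(m, j):
--     # binomial coefficient C(m, j) via the falling-factorial recursion on j
--     if j <= 0:
--         return 1
--     return _nck(m - 1, j - 1) * m // j
--
--
-- def _rle(chars):
--     # run-length encode an already sorted sequence of characters
--     runs = []
--     for ch in chars:
--         if runs and runs[-1][0] == ch:
--             runs[-1] = (ch, runs[-1][1] + 1)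
--         else:
--             runs.append((ch, 1))
--     return runs
--
--
-- def _gen(runs, k):
--     # every distinct size-k sub-multiset of the runs, with its multiplicity:
--     # choose j copies from a run of length m in C(m, j) ways
--     if k == 0:
--         return [("", 1)]
--     if not runs:
--         return []
--     (ch, m), rest = runs[0], runs[1:]
--     out = []
--     for j in range(min(m, k) + 1):
--         w = _nck(m, j)
--         for t, u in _gen(rest, k - j):
--             out.append((ch * j + t, w * u))
--     return out
--
--
-- def solution(orders, course):
--     # Instead of enumerating positional combinations and counting them, compute each
--     # distinct combination string once per order with its multiplicity from run lengths
--     # via binomial coefficients, summed into one dict per distinct course length.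
--     runs_of = [(_rle(sorted(order)), len(order)) for order in orders]
--     tables = {}
--     for c in set(course):
--         if c > 0:
--             d = collections.Counter()
--             for runs, ln in runs_of:
--                 if c <= ln:
--                     for t, w in _gen(runs, c):
--                         d[t] += w
--             tables[c] = d
--     answer = []
--     for c in course:
--         cnt = tables.get(c)
--         if cnt:
--             m = max(cnt.values())
--             if m >= 2:
--                 answer.extend(k for k, v in cnt.items() if v == m)
--     return sorted(answer)
-- ===== Notes on version B (the rewrite author's own statement) =====
-- stated objective: faster
-- what changed: B never enumerates positional combinations: it run-length-encodes each sorted order once and, per distinct positive course length, generates every DISTINCT combination string exactly once per long-enough order together with its multiplicity, computed arithmetically as a product of binomial coefficients over the run lengths, summing these weights into one dict; A instead re-enumerates all positional combinations with a recursive generator for every course entry, sorts each one, and counts them with Counter.most_common.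
import Mathlib
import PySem

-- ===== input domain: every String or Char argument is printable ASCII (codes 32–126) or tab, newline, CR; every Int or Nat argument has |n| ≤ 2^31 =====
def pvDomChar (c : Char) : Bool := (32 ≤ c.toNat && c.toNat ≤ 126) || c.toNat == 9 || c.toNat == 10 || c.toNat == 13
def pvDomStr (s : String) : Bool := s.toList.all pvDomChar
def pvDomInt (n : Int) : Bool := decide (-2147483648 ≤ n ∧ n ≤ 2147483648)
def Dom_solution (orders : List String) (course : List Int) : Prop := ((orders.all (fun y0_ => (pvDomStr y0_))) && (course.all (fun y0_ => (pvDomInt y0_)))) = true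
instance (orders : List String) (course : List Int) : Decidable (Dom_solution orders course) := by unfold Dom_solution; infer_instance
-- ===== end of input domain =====

-- B never enumerates positional combinations: it run-length-encodes each sorted order and
-- generates every distinct combination string once with its multiplicity (a product of
-- binomial coefficients over the run lengths), summed into one dict per distinct course
-- length; A enumerates all positional combinations per course entry and counts them.

-- ===== PORT A =====
-- A's recursive comb helper; in the n>1 branch 1 < n ≤ len(lst), so range(len(lst)-n+1)
-- equals List.range (lst.length - n.toNat + 1), every index i is in range (lst[i] exact via getD)
-- and lst[i+1:] = lst.drop (i+1): exact on every reachable input.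
def combA (lst : List Char) (n : Int) : List (List Char) :=
  if n > (lst.length : Int) then []
  else if n = 1 then lst.map (fun i => [i])
  else if n > 1 then
    (List.range (lst.length - n.toNat + 1)).attach.foldl
      (fun res i =>
        res ++ (combA (lst.drop (i.1 + 1)) (n - 1)).map (fun tmp => lst.getD i.1 ' ' :: tmp))
      []
  else []
termination_by lst.length
decreasing_by
  have hi := i.2
  simp [List.mem_range] at hi
  have : 1 < n := by omega
  simp [List.length_drop]
  omega

def solution (orders : List String) (course : List Int) : List String :=
  let answer := course.foldl (fun answer c =>
    let tmp : List String := orders.foldl (fun tmp order =>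
      (combA order.toList c).foldl (fun tmp i =>
        tmp ++ [String.ofList (PySem.List.sorted i (fun x => x) false)]) tmp) []
    let tmpMC := PySem.List.sorted (PySem.Dict.counter tmp).items (fun kv => kv.2) true
    tmpMC.foldl (fun answer kv =>
      if 2 ≤ kv.2 ∧ (tmpMC.headD ("", 0)).2 = kv.2 then answer ++ [kv.1] else answer)
      answer) []
  PySem.List.sorted answer (fun x => x) false

-- ===== PORT B =====
-- C(m, j) by the falling-factorial recursion on j (exact: '//' is PySem.Int.floordiv)
def nckB (m j : Int) : Int :=
  if j ≤ 0 then 1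
  else PySem.Int.floordiv (nckB (m - 1) (j - 1) * m) j
termination_by j.toNat
decreasing_by omega

-- run-length encoding loop; runs[-1] update = dropLast ++ [...] (runs is nonempty there)
def rleB (chars : List Char) : List (Char × Int) :=
  chars.foldl (fun runs ch =>
    match runs.getLast? with
    | some (c, m) => if c = ch then runs.dropLast ++ [(c, m + 1)] else runs ++ [(ch, 1)]
    | none => [(ch, 1)]) []

-- _gen: distinct size-k sub-multisets with multiplicities; the two nested appending loops
-- are flatMap/map; ch * j is List.replicate j.toNat ch
def genB (runs : List (Char × Int)) (k : Int) : List (List Char × Int) :=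
  if k = 0 then [([], 1)]
  else
    match runs with
    | [] => []
    | (ch, m) :: rest =>
      (PySem.List.pyRange 0 (min m k + 1) 1).flatMap (fun j =>
        (genB rest (k - j)).map (fun tu => (List.replicate j.toNat ch ++ tu.1, nckB m j * tu.2)))
termination_by runs.length
decreasing_by simp

def solution_alt (orders : List String) (course : List Int) : List String :=
  let runsOf := orders.map (fun order =>
    (rleB (PySem.List.sorted order.toList (fun x => x) false), PySem.Str.len order))
  let tables : PySem.Dict Int (PySem.Dict String Int) :=
    (PySem.Set.ofList course).foldl (fun tables c =>
      if 0 < c then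
        tables.insert c (runsOf.foldl (fun d rl =>
          if c ≤ rl.2 then
            (genB rl.1 c).foldl (fun d tw =>
              d.insert (String.ofList tw.1) (d.getD (String.ofList tw.1) 0 + tw.2)) d
          else d)
          PySem.Dict.empty)
      else tables) PySem.Dict.empty
  let answer := course.foldl (fun answer c =>
    match tables.get? c with
    | none => answer
    | some cnt =>
      if cnt.items = [] then answer   -- Python's "if cnt:" falsy test on an empty Counter
      else
        match PySem.List.max? cnt.values (fun x => x) with
        | none => answer
        | some m =>
          if 2 ≤ m then
            answer ++ (cnt.items.filter (fun kv => kv.2 = m)).map (fun kv => kv.1)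
          else answer) []
  PySem.List.sorted answer (fun x => x) false

-- ===== PRECONDITION & SPEC =====
def Spec_solution (orders : List String) (course : List Int) (out : List String) : Prop := out = solution_alt orders course
instance (orders : List String) (course : List Int) (out : List String) : Decidable (Spec_solution orders course out) := by unfold Spec_solution; infer_instance

-- ===== CLAIM (what is proved, stated in full; the proofs are below) =====
def Claim_equal_solution : Prop := ∀ (orders : List String) (course : List Int), Dom_solution orders course → Spec_solution orders course (solution orders course)

-- ===== LEMMAS AND PROOFS =====

-- abbreviations used only by the proofs
def sortC (t : List Char) : List Char := PySem.List.sorted t (fun x => x) false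

def tmpLA (orders : List String) (c : Int) : List String :=
  orders.flatMap (fun o => (combA o.toList c).map (fun i => String.ofList (sortC i)))

def selA (orders : List String) (c : Int) : List String :=
  let tmpMC := PySem.List.sorted (PySem.Dict.counter (tmpLA orders c)).items (fun kv => kv.2) true
  (tmpMC.filter (fun kv => decide (2 ≤ kv.2 ∧ (tmpMC.headD ("", 0)).2 = kv.2))).map (fun kv => kv.1)

-- ---- structural rewrite of port A ----
def bigFA (orders : List String) : List String → Int → List String := fun answer c =>
  let tmp : List String := orders.foldl (fun tmp order =>
    (combA order.toList c).foldl (fun tmp i =>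
      tmp ++ [String.ofList (PySem.List.sorted i (fun x => x) false)]) tmp) []
  let tmpMC := PySem.List.sorted (PySem.Dict.counter tmp).items (fun kv => kv.2) true
  tmpMC.foldl (fun answer kv =>
    if 2 ≤ kv.2 ∧ (tmpMC.headD ("", 0)).2 = kv.2 then answer ++ [kv.1] else answer) answer

theorem ite_decide_append (h : Int) :
    (fun (ans : List String) (kv : String × Int) =>
      if 2 ≤ kv.2 ∧ h = kv.2 then ans ++ [kv.1] else ans)
    = (fun ans kv =>
      if (fun kv : String × Int => decide (2 ≤ kv.2 ∧ h = kv.2)) kv = true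
      then ans ++ [kv.1] else ans) := by
  funext ans kv
  simp

theorem bodyA (orders : List String) (answer : List String) (c : Int) :
    bigFA orders answer c = answer ++ selA orders c := by
  unfold bigFA selA tmpLA
  simp only []
  have h0 : (fun (tmp : List String) (order : String) =>
      (combA order.toList c).foldl (fun tmp i =>
        tmp ++ [String.ofList (PySem.List.sorted i (fun x => x) false)]) tmp)
      = (fun tmp order => tmp ++ (combA order.toList c).map (fun i => String.ofList (sortC i))) := by
    funext tmp order
    exact PySem.List.foldl_append_singleton_eq_map _ _ _
  rw [h0, PySem.List.foldl_append_eq_flatMap, List.nil_append,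
    ite_decide_append, PySem.List.foldl_append_if]

theorem foldl_bigFA (orders : List String) (course : List Int) (init : List String) :
    course.foldl (bigFA orders) init = init ++ course.flatMap (selA orders) := by
  induction course generalizing init with
  | nil => simp
  | cons c cs ih =>
    rw [List.foldl_cons, ih, bodyA, List.flatMap_cons, List.append_assoc]

theorem solution_eq (orders : List String) (course : List Int) :
    solution orders course
      = PySem.List.sorted (course.flatMap (selA orders)) (fun x => x) false := by
  show PySem.List.sorted (course.foldl (bigFA orders) []) (fun x => x) false = _
  rw [foldl_bigFA, List.nil_append]

-- ---- structural rewrite of port B ----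
def addW (d : PySem.Dict String Int) (tw : List Char × Int) : PySem.Dict String Int :=
  d.insert (String.ofList tw.1) (d.getD (String.ofList tw.1) 0 + tw.2)

def rho (o : String) : List (Char × Int) × Int := (rleB (sortC o.toList), PySem.Str.len o)

def dB (orders : List String) (c : Int) : PySem.Dict String Int :=
  (orders.map rho).foldl (fun d rl =>
    if c ≤ rl.2 then (genB rl.1 c).foldl addW d else d) PySem.Dict.empty

def selB (orders : List String) (c : Int) : List String :=
  if 0 < c then
    if (dB orders c).items = [] then []
    else
      match PySem.List.max? (dB orders c).values (fun x => x) with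
      | none => []
      | some m =>
        if 2 ≤ m then ((dB orders c).items.filter (fun kv => kv.2 = m)).map (fun kv => kv.1)
        else []
  else []

def tablesB (orders : List String) (course : List Int) : PySem.Dict Int (PySem.Dict String Int) :=
  (PySem.Set.ofList course).foldl (fun tables c =>
    if 0 < c then tables.insert c (dB orders c)
    else tables) PySem.Dict.empty

def bigFB (tables : PySem.Dict Int (PySem.Dict String Int)) :
    List String → Int → List String := fun answer c =>
  match tables.get? c with
  | none => answer
  | some cnt =>
    if cnt.items = [] then answer
    else
      match PySem.List.max? cnt.values (fun x => x) with
      | none => answer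
      | some m =>
        if 2 ≤ m then
          answer ++ (cnt.items.filter (fun kv => kv.2 = m)).map (fun kv => kv.1)
        else answer

theorem tablesB_get?_aux (orders : List String) (l : List Int)
    (d : PySem.Dict Int (PySem.Dict String Int)) (c0 : Int) :
    (l.foldl (fun tables c =>
      if 0 < c then tables.insert c (dB orders c) else tables) d).get? c0
      = if c0 ∈ l ∧ 0 < c0 then some (dB orders c0) else d.get? c0 := by
  induction l generalizing d with
  | nil => simp
  | cons x xs ih =>
    rw [List.foldl_cons, ih]
    by_cases hmem : c0 ∈ xs ∧ 0 < c0
    · rw [if_pos hmem, if_pos ⟨List.mem_cons_of_mem x hmem.1, hmem.2⟩]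
    · rw [if_neg hmem]
      by_cases hx : c0 = x
      · subst hx
        by_cases hpos : 0 < c0
        · rw [if_pos hpos, PySem.Dict.get?_insert_self,
            if_pos ⟨List.mem_cons_self, hpos⟩]
        · rw [if_neg hpos, if_neg (fun h => hpos h.2)]
      · have : ¬ (c0 ∈ x :: xs ∧ 0 < c0) := by
          intro h
          rcases List.mem_cons.mp h.1 with h1 | h1
          · exact hx h1
          · exact hmem ⟨h1, h.2⟩
        rw [if_neg this]
        by_cases hpos : 0 < x
        · rw [if_pos hpos, PySem.Dict.get?_insert_of_ne _ _ hx]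
        · rw [if_neg hpos]

theorem tablesB_get? (orders : List String) (course : List Int) (c0 : Int) :
    (tablesB orders course).get? c0
      = if c0 ∈ course ∧ 0 < c0 then some (dB orders c0) else none := by
  unfold tablesB
  rw [tablesB_get?_aux]
  by_cases h : c0 ∈ PySem.Set.ofList course ∧ 0 < c0
  · rw [if_pos h, if_pos ⟨(PySem.Set.mem_ofList course c0).mp h.1, h.2⟩]
  · rw [if_neg h, if_neg (fun hc => h ⟨(PySem.Set.mem_ofList course c0).mpr hc.1, hc.2⟩)]
    simp [PySem.Dict.get?, PySem.Dict.empty]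

theorem bodyB (orders : List String) (course : List Int) (answer : List String) (c : Int)
    (hmem : c ∈ course) :
    bigFB (tablesB orders course) answer c = answer ++ selB orders c := by
  unfold bigFB selB
  rw [tablesB_get? orders course c]
  by_cases hpos : 0 < c
  · rw [if_pos ⟨hmem, hpos⟩, if_pos hpos]
    simp only []
    by_cases hnil : (dB orders c).items = []
    · rw [if_pos hnil, if_pos hnil]
      simp
    · rw [if_neg hnil, if_neg hnil]
      rcases h0 : PySem.List.max? (dB orders c).values (fun x => x) with _ | m
      · simp
      · simp only []
        by_cases h2m : 2 ≤ m
        · rw [if_pos h2m, if_pos h2m]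
        · rw [if_neg h2m, if_neg h2m]
          simp
  · rw [if_neg (fun h => hpos h.2), if_neg hpos]
    simp only []
    simp

theorem solution_alt_eq (orders : List String) (course : List Int) :
    solution_alt orders course
      = PySem.List.sorted (course.flatMap (selB orders)) (fun x => x) false := by
  show PySem.List.sorted (course.foldl (bigFB (tablesB orders course)) []) (fun x => x) false = _
  have h1 : course.foldl (bigFB (tablesB orders course)) []
      = course.foldl (fun answer c => answer ++ selB orders c) [] := by
    apply PySem.List.foldl_congr_mem'
    intro x hx acc
    exact bodyB orders course acc x hx
  rw [h1, PySem.List.foldl_append_eq_flatMap, List.nil_append]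

-- ---- A's comb equals itertools combinations ----
theorem combA_of_nonpos (lst : List Char) (n : Int) (h : n < 1) : combA lst n = [] := by
  rw [combA]
  have h1 : ¬ (n > (lst.length : Int)) := by
    have : (0:Int) ≤ lst.length := by positivity
    omega
  rw [if_neg h1, if_neg (by omega), if_neg (by omega)]

theorem combA_gt_one (lst : List Char) (n : Int) (h1 : 1 < n) (h2 : n ≤ (lst.length : Int)) :
    combA lst n = (List.range (lst.length - n.toNat + 1)).flatMap
      (fun i => (combA (lst.drop (i + 1)) (n - 1)).map (fun tmp => lst.getD i ' ' :: tmp)) := by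
  rw [combA, if_neg (by omega), if_neg (by omega), if_pos h1]
  rw [List.foldl_attach (f := fun res i => res ++ (combA (lst.drop (i+1)) (n-1)).map (fun tmp => lst.getD i ' ' :: tmp)) (b := [])]
  rw [PySem.List.foldl_append_eq_flatMap]
  simp

theorem combA_eq_combinations (lst : List Char) (n : Int) (h : 1 ≤ n) :
    combA lst n = PySem.List.combinations lst n.toNat := by
  induction lst generalizing n with
  | nil =>
    rw [combA, if_pos (by simp; omega),
      PySem.List.combinations_eq_nil_of_length_lt _ (by simp; omega)]
  | cons x xs ih =>
    rcases eq_or_lt_of_le h with h1 | h1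
    · rw [← h1, combA]
      norm_num [PySem.List.combinations_one]
    · by_cases h2 : n ≤ ((x :: xs).length : Int)
      · rw [combA_gt_one _ _ h1 h2]
        obtain ⟨m, hm⟩ : ∃ m, n.toNat = m + 1 := ⟨n.toNat - 1, by omega⟩
        have hlen : (x :: xs).length - n.toNat + 1 = (xs.length + 1 - n.toNat) + 1 := by
          simp only [List.length_cons]
        rw [hlen, List.range_succ_eq_map, List.flatMap_cons, List.flatMap_map]
        conv_rhs => rw [hm, PySem.List.combinations_cons_succ]
        congr 1
        · rw [show (x :: xs).drop (0 + 1) = xs from rfl, ih (n-1) (by omega),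
            show (n-1).toNat = m by omega]
          rfl
        · have hfun : (fun a => List.map (fun tmp => (x :: xs).getD a.succ ' ' :: tmp)
              (combA (List.drop (a.succ + 1) (x :: xs)) (n - 1)))
              = (fun i => List.map (fun tmp => xs.getD i ' ' :: tmp)
              (combA (List.drop (i + 1) xs) (n - 1))) := by
            funext a
            rw [show a.succ + 1 = a + 1 + 1 from rfl, List.drop_succ_cons,
              show (x :: xs).getD a.succ ' ' = xs.getD a ' ' from rfl]
          rw [hfun, ← hm, ← ih n (by omega)]
          by_cases h3 : n ≤ (xs.length : Int)
          · rw [combA_gt_one _ _ h1 h3,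
              show xs.length + 1 - n.toNat = xs.length - n.toNat + 1 by omega]
          · rw [show xs.length + 1 - n.toNat = 0 by simp only [List.length_cons] at h2; omega,
              combA, if_pos (by omega)]
            rfl
      · rw [combA, if_pos (by omega),
          PySem.List.combinations_eq_nil_of_length_lt _ (by simp only [List.length_cons] at h2 ⊢; omega)]

theorem combinations_perm_sublistsLen (l : List Char) (k : Nat) :
    (PySem.List.combinations l k).Perm (List.sublistsLen k l) := by
  induction l generalizing k with
  | nil => cases k <;> simp [PySem.List.combinations_zero, PySem.List.combinations_nil_succ]
  | cons x xs ih =>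
    cases k with
    | zero => simp [PySem.List.combinations_zero]
    | succ k =>
      rw [List.sublistsLen_succ_cons, PySem.List.combinations_cons_succ]
      exact (((ih k).map _).append (ih (k+1))).trans (List.perm_append_comm)

theorem sortC_eq_of_perm {s t : List Char} (h : s.Perm t) : sortC s = sortC t :=
  PySem.List.sorted_eq_sorted_of_perm s t (fun x => x) (fun _ _ hx => hx) h

theorem sortC_perm (t : List Char) : (sortC t).Perm t :=
  PySem.List.sorted_perm t (fun x => x) false

theorem sortC_coe (t : List Char) :
    sortC t = sortC ((t : Multiset Char).toList) :=
  sortC_eq_of_perm ((Multiset.coe_eq_coe).mp (Multiset.coe_toList _).symm)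

theorem map_sortC_sublistsLen_perm {l₁ l₂ : List Char} (h : l₁.Perm l₂) (k : Nat) :
    ((List.sublistsLen k l₁).map sortC).Perm ((List.sublistsLen k l₂).map sortC) := by
  have hp := (Multiset.powersetCardAux_perm (n := k) h).map
    (fun m : Multiset Char => sortC m.toList)
  rw [Multiset.powersetCardAux_eq_map_coe, Multiset.powersetCardAux_eq_map_coe,
    List.map_map, List.map_map] at hp
  have : ((fun m : Multiset Char => sortC m.toList) ∘ Multiset.ofList) = sortC := by
    funext t
    exact (sortC_coe t).symm
  rwa [this] at hp

theorem map_sortC_combinations_sorted (l : List Char) (k : Nat) :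
    (PySem.List.combinations (sortC l) k).map sortC = PySem.List.combinations (sortC l) k := by
  have : ∀ t ∈ PySem.List.combinations (sortC l) k, sortC t = id t := by
    intro t ht
    have hsub := PySem.List.sublist_of_mem_combinations ht
    have hpw : List.Pairwise (fun a b : Char => a ≤ b) (sortC l) :=
      PySem.List.sorted_pairwise l (fun x => x)
    exact PySem.List.sorted_eq_self_of_pairwise t (fun x => x) (hpw.sublist hsub)
  rw [List.map_congr_left this, List.map_id]

theorem map_sortC_combinations_perm {l₁ l₂ : List Char} (h : l₁.Perm l₂) (k : Nat) :
    ((PySem.List.combinations l₁ k).map sortC).Perm ((PySem.List.combinations l₂ k).map sortC) :=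
  (((combinations_perm_sublistsLen l₁ k).map sortC).trans (map_sortC_sublistsLen_perm h k)).trans
    ((combinations_perm_sublistsLen l₂ k).map sortC).symm

theorem per_order_perm (o : String) (c : Int) (h : 1 ≤ c) :
    ((combA o.toList c).map (fun i => String.ofList (sortC i))).Perm
      ((PySem.List.combinations (sortC o.toList) c.toNat).map String.ofList) := by
  rw [combA_eq_combinations _ _ h]
  have h3 := (map_sortC_combinations_perm (sortC_perm o.toList).symm c.toNat).map String.ofList
  rw [List.map_map, ← List.map_map (g := String.ofList) (f := sortC),
    map_sortC_combinations_sorted o.toList c.toNat, List.map_map] at h3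
  exact h3

-- ---- nckB computes the binomial coefficient ----
theorem nckB_eq_choose_nat (jn : Nat) : ∀ (m : Int), (jn : Int) ≤ m →
    nckB m (jn : Int) = (Nat.choose m.toNat jn : Int) := by
  induction jn with
  | zero =>
    intro m hm
    rw [nckB, if_pos (by omega)]
    simp
  | succ n ih =>
    intro m hm
    have hm' : (n : Int) + 1 ≤ m := by push_cast at hm ⊢; omega
    rw [nckB, if_neg (by push_cast; omega)]
    have hcast : ((n + 1 : Nat) : Int) - 1 = (n : Int) := by push_cast; ring
    rw [hcast, ih (m - 1) (by omega)]
    have hsub : (m - 1).toNat = m.toNat - 1 := by omega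
    have hpascal : m.toNat * Nat.choose (m.toNat - 1) n = Nat.choose m.toNat (n + 1) * (n + 1) := by
      have h1 : m.toNat - 1 + 1 = m.toNat := by omega
      have h2 := Nat.add_one_mul_choose_eq (m.toNat - 1) n
      rw [h1] at h2
      exact h2
    have hnum : (Nat.choose (m.toNat - 1) n : Int) * m
        = (Nat.choose m.toNat (n + 1) : Int) * ((n + 1 : Nat) : Int) := by
      have h3 := congrArg (fun x : Nat => (x : Int)) hpascal
      push_cast at h3 ⊢
      have hmm : ((m.toNat : Int)) = m := Int.toNat_of_nonneg (by omega)
      rw [hmm] at h3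
      linarith
    rw [hsub, hnum, PySem.Int.floordiv_eq_ediv_of_pos (by push_cast; omega),
      Int.mul_ediv_cancel _ (by push_cast; omega)]

theorem nckB_eq_choose (m j : Int) (h0 : 0 ≤ j) (h1 : j ≤ m) :
    nckB m j = (Nat.choose m.toNat j.toNat : Int) := by
  have := nckB_eq_choose_nat j.toNat m (by omega)
  rwa [Int.toNat_of_nonneg h0] at this

-- ---- rleB: flattening gives the input back; run lengths are ≥ 1 ----
def flatRuns (runs : List (Char × Int)) : List Char :=
  runs.flatMap (fun p => List.replicate p.2.toNat p.1)

def rleStep (runs : List (Char × Int)) (ch : Char) : List (Char × Int) :=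
  match runs.getLast? with
  | some (c, m) => if c = ch then runs.dropLast ++ [(c, m + 1)] else runs ++ [(ch, 1)]
  | none => [(ch, 1)]

theorem rleB_eq_foldl (chars : List Char) : rleB chars = chars.foldl rleStep [] := rfl

theorem rleStep_pos (runs : List (Char × Int)) (ch : Char) (h : ∀ p ∈ runs, 1 ≤ p.2) :
    ∀ p ∈ rleStep runs ch, 1 ≤ p.2 := by
  intro p hp
  unfold rleStep at hp
  rcases hL : runs.getLast? with _ | ⟨c, m⟩
  · rw [hL] at hp
    simp at hp
    simp [hp]
  · rw [hL] at hp
    dsimp only at hp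
    have hm : 1 ≤ m := h (c, m) (List.mem_of_getLast? hL)
    by_cases hc : c = ch
    · rw [if_pos hc] at hp
      rcases List.mem_append.mp hp with h1 | h1
      · exact h p (List.Sublist.subset (List.dropLast_sublist runs) h1)
      · simp at h1
        simp [h1]
        omega
    · rw [if_neg hc] at hp
      rcases List.mem_append.mp hp with h1 | h1
      · exact h p h1
      · simp at h1
        simp [h1]

theorem rleStep_flat (runs : List (Char × Int)) (ch : Char) (h : ∀ p ∈ runs, 1 ≤ p.2) :
    flatRuns (rleStep runs ch) = flatRuns runs ++ [ch] := by
  unfold rleStep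
  rcases hL : runs.getLast? with _ | ⟨c, m⟩
  · rw [List.getLast?_eq_none_iff.mp hL]
    simp [flatRuns]
  · obtain ⟨ys, rfl⟩ : ∃ ys, runs = ys ++ [(c, m)] := by
      rcases List.getLast?_eq_some_iff.mp hL with ⟨ys, hys⟩
      exact ⟨ys, hys⟩
    dsimp only
    have hm : 1 ≤ m := h (c, m) (by simp)
    by_cases hc : c = ch
    · rw [if_pos hc, List.dropLast_concat]
      unfold flatRuns
      rw [List.flatMap_append, List.flatMap_append]
      simp only [List.flatMap_cons, List.flatMap_nil, List.append_nil]
      rw [show (m + 1).toNat = m.toNat + 1 by omega, List.replicate_succ',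
        ← hc, List.append_assoc]
    · rw [if_neg hc]
      unfold flatRuns
      rw [List.flatMap_append]
      simp

theorem rle_fold (l : List Char) : ∀ runs, (∀ p ∈ runs, 1 ≤ p.2) →
    (∀ p ∈ l.foldl rleStep runs, 1 ≤ p.2) ∧
      flatRuns (l.foldl rleStep runs) = flatRuns runs ++ l := by
  induction l with
  | nil =>
    intro runs h
    exact ⟨h, by simp⟩
  | cons ch t ih =>
    intro runs h
    rw [List.foldl_cons]
    obtain ⟨h1, h2⟩ := ih (rleStep runs ch) (rleStep_pos runs ch h)
    refine ⟨h1, ?_⟩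
    rw [h2, rleStep_flat runs ch h, List.append_assoc]
    rfl

theorem flatRuns_rleB (l : List Char) : flatRuns (rleB l) = l := by
  rw [rleB_eq_foldl]
  have := (rle_fold l [] (by simp)).2
  simpa [flatRuns] using this

theorem rleB_pos (l : List Char) : ∀ p ∈ rleB l, 1 ≤ p.2 := by
  rw [rleB_eq_foldl]
  exact (rle_fold l [] (by simp)).1

-- ---- genB: weights are positive; its weighted expansion is the combinations multiset ----
def expand (g : List (List Char × Int)) : List (List Char) :=
  g.flatMap (fun tw => List.replicate tw.2.toNat tw.1)

theorem genB_w_pos (runs : List (Char × Int)) (hr : ∀ p ∈ runs, 1 ≤ p.2) (k : Int) :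
    ∀ tw ∈ genB runs k, 1 ≤ tw.2 := by
  induction runs generalizing k with
  | nil =>
    intro tw htw
    rw [genB] at htw
    by_cases hk : k = 0
    · rw [if_pos hk] at htw
      simp at htw
      simp [htw]
    · rw [if_neg hk] at htw
      simp at htw
  | cons p rest ih =>
    intro tw htw
    obtain ⟨ch, m⟩ := p
    rw [genB] at htw
    by_cases hk : k = 0
    · rw [if_pos hk] at htw
      simp at htw
      simp [htw]
    · rw [if_neg hk] at htw
      simp only [List.mem_flatMap, List.mem_map] at htw
      obtain ⟨j, hj, tu, htu, rfl⟩ := htw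
      rw [PySem.List.mem_pyRange_one] at hj
      have hm : 1 ≤ m := hr (ch, m) (List.mem_cons_self ..)
      have hu : 1 ≤ tu.2 := ih (fun q hq => hr q (List.mem_cons_of_mem _ hq)) (k - j) tu htu
      have hnck : 1 ≤ nckB m j := by
        rw [nckB_eq_choose m j (by omega) (by omega)]
        have := Nat.choose_pos (show j.toNat ≤ m.toNat by omega)
        omega
      simp only []
      nlinarith [hnck, hu]

theorem multisetMapRangeSum (f : List Char → List Char) (n : Nat) (F : Nat → Multiset (List Char)) :
    Multiset.map f (∑ j ∈ Finset.range n, F j) = ∑ j ∈ Finset.range n, Multiset.map f (F j) :=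
  map_sum (Multiset.mapAddMonoidHom f) F (Finset.range n)

theorem comb_replicate_sum (M : Nat) (ch : Char) : ∀ (K : Nat) (L : List Char),
    (↑(PySem.List.combinations (List.replicate M ch ++ L) K) : Multiset (List Char))
    = ∑ j ∈ Finset.range (K + 1),
        Nat.choose M j • Multiset.map (fun t => List.replicate j ch ++ t)
          (↑(PySem.List.combinations L (K - j)) : Multiset (List Char)) := by
  induction M with
  | zero =>
    intro K L
    rw [Finset.sum_eq_single_of_mem 0 (Finset.mem_range.mpr (by omega))]
    · simp
    · intro j hj hne
      rw [Nat.choose_eq_zero_of_lt (by omega), zero_nsmul]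
  | succ M ihM =>
    intro K L
    cases K with
    | zero =>
      simp [PySem.List.combinations_zero]
    | succ K =>
      have hsplit : List.replicate (M + 1) ch ++ L = ch :: (List.replicate M ch ++ L) := by
        rw [List.replicate_succ, List.cons_append]
      rw [hsplit, PySem.List.combinations_cons_succ,
        (Multiset.coe_add _ _).symm, ← Multiset.map_coe, ihM K L, ihM (K + 1) L]
      have hmap : Multiset.map (fun c => ch :: c)
          (∑ j ∈ Finset.range (K + 1), Nat.choose M j • Multiset.map
            (fun t => List.replicate j ch ++ t)
            (↑(PySem.List.combinations L (K - j)) : Multiset (List Char)))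
          = ∑ j ∈ Finset.range (K + 1), Nat.choose M j • Multiset.map
              (fun t => List.replicate (j + 1) ch ++ t)
              (↑(PySem.List.combinations L (K - j)) : Multiset (List Char)) := by
        rw [multisetMapRangeSum]
        refine Finset.sum_congr rfl fun j hj => ?_
        rw [Multiset.map_nsmul, Multiset.map_map]
        have hcomp : ((fun c => ch :: c) ∘ fun t => List.replicate j ch ++ t)
            = (fun t : List Char => List.replicate (j + 1) ch ++ t) := by
          funext t
          simp [List.replicate_succ]
        rw [hcomp]
      rw [hmap]
      rw [Finset.sum_range_succ' (fun j => Nat.choose (M + 1) j • Multiset.map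
            (fun t => List.replicate j ch ++ t)
            (↑(PySem.List.combinations L (K + 1 - j)) : Multiset (List Char))) (K + 1)]
      rw [Finset.sum_range_succ' (fun j => Nat.choose M j • Multiset.map
            (fun t => List.replicate j ch ++ t)
            (↑(PySem.List.combinations L (K + 1 - j)) : Multiset (List Char))) (K + 1)]
      simp only [Nat.succ_sub_succ, Nat.choose_zero_right, one_nsmul]
      rw [← add_assoc, ← Finset.sum_add_distrib]
      congr 1
      refine Finset.sum_congr rfl fun j hj => ?_
      rw [← add_nsmul, ← Nat.choose_succ_succ]

theorem coe_flatMap_range {α : Type} (f : Nat → List α) (n : Nat) :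
    (↑((List.range n).flatMap f) : Multiset α) = ∑ j ∈ Finset.range n, (↑(f j) : Multiset α) := by
  induction n with
  | zero => simp
  | succ n ih =>
    rw [List.range_succ, List.flatMap_append, Finset.sum_range_succ, ← ih,
      (Multiset.coe_add _ _).symm]
    simp

theorem expand_flatMap (l : List Nat) (F : Nat → List (List Char × Int)) :
    expand (l.flatMap F) = l.flatMap (fun j => expand (F j)) := by
  unfold expand
  rw [List.flatMap_assoc]

theorem expand_scaled (g : List (List Char × Int)) (pre : List Char) (w : Int) (hw : 0 ≤ w)
    (hg : ∀ tw ∈ g, 0 ≤ tw.2) :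
    (↑(expand (g.map (fun tu => (pre ++ tu.1, w * tu.2)))) : Multiset (List Char))
      = w.toNat • Multiset.map (fun t => pre ++ t) (↑(expand g) : Multiset (List Char)) := by
  induction g with
  | nil => simp [expand]
  | cons tu g ih =>
    have hu : 0 ≤ tu.2 := hg tu (List.mem_cons_self ..)
    unfold expand
    rw [List.map_cons, List.flatMap_cons, List.flatMap_cons,
      (Multiset.coe_add _ _).symm, (Multiset.coe_add _ _).symm, Multiset.map_add, smul_add]
    congr 1
    · rw [Multiset.coe_replicate,
        show (Multiset.map (fun t => pre ++ t) (↑(List.replicate tu.2.toNat tu.1) : Multiset (List Char)))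
          = Multiset.replicate tu.2.toNat (pre ++ tu.1) from by
            rw [Multiset.map_coe, List.map_replicate, Multiset.coe_replicate],
        Multiset.nsmul_replicate]
      congr 1
      have h1 : w * tu.2 = ((w.toNat * tu.2.toNat : Nat) : Int) := by
        push_cast
        rw [Int.toNat_of_nonneg hw, Int.toNat_of_nonneg hu]
      rw [h1, Int.toNat_natCast]
    · exact ih (fun q hq => hg q (List.mem_cons_of_mem _ hq))

theorem expand_genB (runs : List (Char × Int)) (hr : ∀ p ∈ runs, 1 ≤ p.2) (k : Int)
    (hk : 0 ≤ k) :
    (↑(expand (genB runs k)) : Multiset (List Char))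
      = (↑(PySem.List.combinations (flatRuns runs) k.toNat) : Multiset (List Char)) := by
  induction runs generalizing k with
  | nil =>
    rw [genB]
    by_cases hk0 : k = 0
    · subst hk0
      simp [expand, flatRuns, PySem.List.combinations_zero]
    · rw [if_neg hk0]
      obtain ⟨K, hK⟩ : ∃ K, k.toNat = K + 1 := ⟨k.toNat - 1, by omega⟩
      rw [hK]
      simp [expand, flatRuns, PySem.List.combinations_nil_succ]
  | cons p rest ih =>
    obtain ⟨ch, m⟩ := p
    rw [genB]
    by_cases hk0 : k = 0
    · subst hk0
      simp [expand, PySem.List.combinations_zero]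
    · rw [if_neg hk0]
      have hm : 1 ≤ m := hr (ch, m) (List.mem_cons_self ..)
      have hrest : ∀ p ∈ rest, 1 ≤ p.2 := fun q hq => hr q (List.mem_cons_of_mem _ hq)
      have hmt : ((m.toNat : Int)) = m := by omega
      have hkt : ((k.toNat : Int)) = k := by omega
      have hrange : PySem.List.pyRange 0 (min m k + 1) 1
          = List.map (fun j : Nat => (j : Int)) (List.range (min m.toNat k.toNat + 1)) := by
        rw [PySem.List.pyRange_one,
          show (min m k + 1 - 0).toNat = min m.toNat k.toNat + 1 by omega]
        refine List.map_congr_left fun a _ => ?_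
        omega
      rw [hrange, List.flatMap_map, expand_flatMap, coe_flatMap_range]
      have hterm : ∀ j ∈ Finset.range (min m.toNat k.toNat + 1),
          (↑(expand ((genB rest (k - (j : Int))).map
            (fun tu => (List.replicate ((j : Int)).toNat ch ++ tu.1, nckB m (j : Int) * tu.2)))) : Multiset (List Char))
          = Nat.choose m.toNat j • Multiset.map (fun t => List.replicate j ch ++ t)
              (↑(PySem.List.combinations (flatRuns rest) (k.toNat - j)) : Multiset (List Char)) := by
        intro j hj
        rw [Finset.mem_range] at hj
        have hj1 : (j : Int) ≤ m := by omega
        have hj2 : (j : Int) ≤ k := by omega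
        have hwpos : ∀ tw ∈ genB rest (k - (j : Int)), (0 : Int) ≤ tw.2 :=
          fun tw htw => le_trans (by omega) (genB_w_pos rest hrest (k - (j : Int)) tw htw)
        have hw0 : 0 ≤ nckB m (j : Int) := by
          rw [nckB_eq_choose m (j : Int) (by omega) hj1]
          positivity
        rw [show ((j : Int)).toNat = j from by omega]
        rw [expand_scaled _ _ _ hw0 hwpos, ih hrest (k - (j : Int)) (by omega)]
        rw [nckB_eq_choose m (j : Int) (by omega) hj1]
        simp only [Int.toNat_natCast]
        rw [show (k - (j : Int)).toNat = k.toNat - j from by omega]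
      rw [Finset.sum_congr rfl hterm]
      have hext : ∑ j ∈ Finset.range (min m.toNat k.toNat + 1),
            Nat.choose m.toNat j • Multiset.map (fun t => List.replicate j ch ++ t)
              (↑(PySem.List.combinations (flatRuns rest) (k.toNat - j)) : Multiset (List Char))
          = ∑ j ∈ Finset.range (k.toNat + 1),
            Nat.choose m.toNat j • Multiset.map (fun t => List.replicate j ch ++ t)
              (↑(PySem.List.combinations (flatRuns rest) (k.toNat - j)) : Multiset (List Char)) := by
        have hsub : Finset.range (min m.toNat k.toNat + 1) ⊆ Finset.range (k.toNat + 1) := by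
          intro x hx
          rw [Finset.mem_range] at hx ⊢
          have := Nat.min_le_right m.toNat k.toNat
          omega
        refine Finset.sum_subset hsub ?_
        intro j hj hnj
        rw [Finset.mem_range] at hj hnj
        have h1 : min m.toNat k.toNat + 1 ≤ j := Nat.le_of_not_lt hnj
        have h2 : j ≤ k.toNat := Nat.lt_succ_iff.mp hj
        rcases Nat.le_total m.toNat k.toNat with hle | hle
        · rw [Nat.choose_eq_zero_of_lt (by rw [Nat.min_eq_left hle] at h1; omega), zero_nsmul]
        · exfalso
          rw [Nat.min_eq_right hle] at h1
          omega
      rw [hext,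
        show flatRuns ((ch, m) :: rest) = List.replicate m.toNat ch ++ flatRuns rest from by
          unfold flatRuns
          rw [List.flatMap_cons]]
      obtain ⟨K, hK⟩ : ∃ K, k.toNat = K := ⟨k.toNat, rfl⟩
      rw [hK] at *
      exact (comb_replicate_sum m.toNat ch K (flatRuns rest)).symm

-- ---- the dict built by B ----
theorem getD_foldW (W : List (List Char × Int)) : ∀ (d : PySem.Dict String Int) (s : String),
    (W.foldl addW d).getD s 0
      = d.getD s 0 + ((W.filter (fun tw => String.ofList tw.1 = s)).map (fun tw => tw.2)).sum := by
  induction W with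
  | nil =>
    intro d s
    simp
  | cons tw W ih =>
    intro d s
    rw [List.foldl_cons, ih, List.filter_cons]
    by_cases h : String.ofList tw.1 = s
    · rw [if_pos (by simp [h])]
      unfold addW
      rw [h, PySem.Dict.getD_insert_self]
      simp only [List.map_cons, List.sum_cons]
      ring
    · rw [if_neg (by simp [h])]
      unfold addW
      rw [PySem.Dict.getD_insert_of_ne _ _ _ (fun hh => h hh.symm)]

theorem keys_foldW (W : List (List Char × Int)) :
    (W.foldl addW PySem.Dict.empty).keys
      = PySem.Set.ofList (W.map (fun tw => String.ofList tw.1)) := by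
  have h := PySem.Dict.keys_foldl_insert_key W (fun tw : List Char × Int => String.ofList tw.1)
    (fun d tw => d.getD (String.ofList tw.1) 0 + tw.2) PySem.Dict.empty
  have hk : (PySem.Dict.empty : PySem.Dict String Int).keys = [] := rfl
  rw [hk, PySem.Set.update_nil_left] at h
  exact h

theorem nodup_keys_foldW (W : List (List Char × Int)) :
    (W.foldl addW PySem.Dict.empty).keys.Nodup :=
  PySem.Dict.nodup_keys_foldl_insert_key W (fun tw : List Char × Int => String.ofList tw.1)
    (fun d tw => d.getD (String.ofList tw.1) 0 + tw.2) PySem.Dict.empty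
    PySem.Dict.nodup_keys_empty

def expandS (g : List (List Char × Int)) : List String :=
  g.flatMap (fun tw => List.replicate tw.2.toNat (String.ofList tw.1))

theorem count_expandS (W : List (List Char × Int)) (s : String) :
    (expandS W).count s
      = ((W.filter (fun tw => String.ofList tw.1 = s)).map (fun tw => tw.2.toNat)).sum := by
  induction W with
  | nil => simp [expandS]
  | cons tw W ih =>
    unfold expandS at ih ⊢
    rw [List.flatMap_cons, List.count_append, ih, List.filter_cons]
    by_cases h : String.ofList tw.1 = s
    · rw [if_pos (by simp [h])]
      simp only [List.map_cons, List.sum_cons]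
      rw [List.count_replicate, if_pos (by simp [h])]
    · rw [if_neg (by simp [h]), List.count_replicate, if_neg (by simp [h])]
      simp

theorem sum_snd_toNat (l : List (List Char × Int)) (h : ∀ tw ∈ l, 0 ≤ tw.2) :
    (l.map (fun tw => tw.2)).sum = (((l.map (fun tw => tw.2.toNat)).sum : Nat) : Int) := by
  induction l with
  | nil => simp
  | cons tw t ih =>
    simp only [List.map_cons, List.sum_cons]
    rw [ih (fun q hq => h q (List.mem_cons_of_mem _ hq))]
    have := h tw (List.mem_cons_self ..)
    push_cast
    omega

theorem items_foldW_perm_counter (W : List (List Char × Int)) (hw : ∀ tw ∈ W, 1 ≤ tw.2) :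
    (W.foldl addW PySem.Dict.empty).items.Perm (PySem.Dict.counter (expandS W)).items := by
  rw [PySem.Dict.items_eq_map_keys (W.foldl addW PySem.Dict.empty) (nodup_keys_foldW W) 0,
    PySem.Dict.items_counter]
  have hfun : (fun k => (k, (W.foldl addW PySem.Dict.empty).getD k 0))
      = (fun k : String => (k, ((expandS W).count k : Int))) := by
    funext s
    rw [getD_foldW W PySem.Dict.empty s,
      show (PySem.Dict.empty : PySem.Dict String Int).getD s 0 = 0 from rfl, zero_add,
      count_expandS,
      sum_snd_toNat _ (fun tw htw => le_trans (by omega) (hw tw (List.mem_of_mem_filter htw)))]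
  rw [hfun]
  have hkeys : (W.foldl addW PySem.Dict.empty).keys.Perm (PySem.Set.ofList (expandS W)) := by
    rw [keys_foldW]
    rw [List.perm_ext_iff_of_nodup (PySem.Set.nodup_ofList _) (PySem.Set.nodup_ofList _)]
    intro s
    rw [PySem.Set.mem_ofList, PySem.Set.mem_ofList]
    unfold expandS
    simp only [List.mem_map, List.mem_flatMap, List.mem_replicate]
    constructor
    · rintro ⟨tw, htw, rfl⟩
      exact ⟨tw, htw, by have := hw tw htw; omega, rfl⟩
    · rintro ⟨tw, htw, _, rfl⟩
      exact ⟨tw, htw, rfl⟩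
  exact hkeys.map _

-- ---- gluing: B's dict is (a permutation of) A's counter ----
def Wl (orders : List String) (c : Int) : List (List Char × Int) :=
  (orders.map rho).flatMap (fun rl => if c ≤ rl.2 then genB rl.1 c else [])

theorem dB_eq_foldW (orders : List String) (c : Int) :
    dB orders c = (Wl orders c).foldl addW PySem.Dict.empty := by
  unfold dB Wl
  have hfun : (fun (d : PySem.Dict String Int) (rl : List (Char × Int) × Int) =>
      if c ≤ rl.2 then (genB rl.1 c).foldl addW d else d)
      = (fun d rl => (if c ≤ rl.2 then genB rl.1 c else []).foldl addW d) := by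
    funext d rl
    by_cases h : c ≤ rl.2 <;> simp [h]
  rw [hfun, List.foldl_flatMap]

theorem Wl_w_pos (orders : List String) (c : Int) : ∀ tw ∈ Wl orders c, 1 ≤ tw.2 := by
  intro tw htw
  unfold Wl at htw
  simp only [List.mem_flatMap, List.mem_map] at htw
  obtain ⟨rl, ⟨o, ho, rfl⟩, htw⟩ := htw
  by_cases hlen : c ≤ (rho o).2
  · rw [if_pos hlen] at htw
    exact genB_w_pos (rho o).1 (rleB_pos _) c tw htw
  · rw [if_neg hlen] at htw
    simp at htw

theorem expandS_eq (g : List (List Char × Int)) :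
    expandS g = (expand g).map String.ofList := by
  unfold expandS expand
  rw [List.map_flatMap]
  simp [List.map_replicate]

theorem per_order_B (o : String) (c : Int) (h : 1 ≤ c) :
    (expandS (if c ≤ (rho o).2 then genB (rho o).1 c else [])).Perm
      ((combA o.toList c).map (fun i => String.ofList (sortC i))) := by
  by_cases hlen : c ≤ (rho o).2
  · rw [if_pos hlen, expandS_eq]
    have h1 : (↑(expand (genB (rho o).1 c)) : Multiset (List Char))
        = ↑(PySem.List.combinations (sortC o.toList) c.toNat) := by
      rw [expand_genB (rho o).1 (rleB_pos _) c (by omega),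
        show flatRuns (rho o).1 = sortC o.toList from flatRuns_rleB _]
    exact ((Multiset.coe_eq_coe.mp h1).map String.ofList).trans (per_order_perm o c h).symm
  · rw [if_neg hlen]
    have hlen2 : (o.toList.length : Int) < c := by
      have := hlen
      unfold rho at this
      rw [PySem.Str.len_eq] at this
      omega
    have hA : combA o.toList c = [] := by
      rw [combA, if_pos (by omega)]
    rw [hA]
    simp [expandS]

theorem expandS_Wl_perm_tmpLA (orders : List String) (c : Int) (h : 1 ≤ c) :
    (expandS (Wl orders c)).Perm (tmpLA orders c) := by
  unfold Wl tmpLA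
  rw [show expandS ((orders.map rho).flatMap (fun rl => if c ≤ rl.2 then genB rl.1 c else []))
      = orders.flatMap (fun o => expandS (if c ≤ (rho o).2 then genB (rho o).1 c else [])) from by
    unfold expandS
    rw [List.flatMap_map, List.flatMap_assoc]]
  exact List.Perm.flatMap_left orders (fun o _ => per_order_B o c h)

theorem set_ofList_perm {xs ys : List String} (h : xs.Perm ys) :
    (PySem.Set.ofList xs).Perm (PySem.Set.ofList ys) := by
  rw [List.perm_ext_iff_of_nodup (PySem.Set.nodup_ofList xs) (PySem.Set.nodup_ofList ys)]
  intro a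
  rw [PySem.Set.mem_ofList, PySem.Set.mem_ofList]
  exact h.mem_iff

theorem items_counter_perm {xs ys : List String} (h : xs.Perm ys) :
    (PySem.Dict.counter xs).items.Perm (PySem.Dict.counter ys).items := by
  rw [PySem.Dict.items_counter, PySem.Dict.items_counter]
  have : (PySem.Set.ofList ys).map (fun k => (k, (List.count k ys : Int)))
      = (PySem.Set.ofList ys).map (fun k => (k, (List.count k xs : Int))) := by
    apply List.map_congr_left
    intro k _
    rw [h.count_eq]
  rw [this]
  exact (set_ofList_perm h).map _

theorem hitems_dB (orders : List String) (c : Int) (h : 1 ≤ c) :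
    ((PySem.Dict.counter (tmpLA orders c)).items).Perm ((dB orders c).items) := by
  have h1 := items_counter_perm (expandS_Wl_perm_tmpLA orders c h).symm
  have h2 := items_foldW_perm_counter (Wl orders c) (Wl_w_pos orders c)
  rw [dB_eq_foldW]
  exact h1.trans h2.symm

theorem tmpLA_of_nonpos (orders : List String) (c : Int) (h : c < 1) :
    tmpLA orders c = [] := by
  unfold tmpLA
  rw [List.flatMap_eq_nil_iff]
  intro o _
  rw [combA_of_nonpos _ _ h]
  rfl

theorem selA_perm_selB (orders : List String) (c : Int) :
    (selA orders c).Perm (selB orders c) := by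
  by_cases hc : 1 ≤ c
  · unfold selA selB
    rw [if_pos (by omega)]
    have hitems : ((PySem.Dict.counter (tmpLA orders c)).items).Perm
        ((dB orders c).items) := hitems_dB orders c hc
    rcases htm : PySem.List.sorted (PySem.Dict.counter (tmpLA orders c)).items
        (fun kv => kv.2) true with _ | ⟨kv0, rest⟩
    · rw [PySem.List.sorted_eq_nil_iff] at htm
      rw [htm] at hitems
      rw [if_pos hitems.symm.eq_nil]
      simp
    · have hpermMC : (PySem.List.sorted (PySem.Dict.counter (tmpLA orders c)).items
          (fun kv => kv.2) true).Perm ((dB orders c).items) :=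
        (PySem.List.sorted_perm _ _ _).trans hitems
      have hne : (dB orders c).items ≠ [] := by
        intro h0
        rw [h0] at hpermMC
        rw [htm] at hpermMC
        exact absurd hpermMC.eq_nil (by simp)
      rw [if_neg hne]
      obtain ⟨m, hmax⟩ : ∃ m, PySem.List.max? (dB orders c).values (fun x => x) = some m := by
        rcases h0 : PySem.List.max? (dB orders c).values (fun x => x) with _ | m
        · rw [PySem.List.max?_eq_none_iff] at h0
          have : (dB orders c).items = [] := by
            have := congrArg List.length h0
            simpa [PySem.Dict.values] using List.eq_nil_of_length_eq_zero (by simpa [PySem.Dict.values] using this)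
          exact absurd this hne
        · exact ⟨m, rfl⟩
      rw [hmax]
      have hpermKV : (kv0 :: rest).Perm ((PySem.Dict.counter (tmpLA orders c)).items) :=
        htm ▸ PySem.List.sorted_perm _ _ _
      have h0 : ∀ y ∈ (PySem.Dict.counter (tmpLA orders c)).items, y.2 ≤ kv0.2 :=
        PySem.List.key_head_sorted_rev_ge ((PySem.Dict.counter (tmpLA orders c)).items) (fun kv : String × Int => kv.2) htm
      have hkv0A : kv0 ∈ (PySem.Dict.counter (tmpLA orders c)).items :=
        hpermKV.subset (List.mem_cons_self ..)
      have hkv0B : kv0 ∈ (dB orders c).items := hitems.subset hkv0A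
      have hm_le : kv0.2 ≤ m := by
        refine PySem.List.max?_isMax hmax kv0.2 ?_
        simp only [PySem.Dict.values]
        exact List.mem_map_of_mem hkv0B
      have hle_m : m ≤ kv0.2 := by
        have hmem := PySem.List.max?_mem hmax
        simp only [PySem.Dict.values, List.mem_map] at hmem
        obtain ⟨kv, hkv, hkv2⟩ := hmem
        exact hkv2 ▸ h0 kv (hitems.symm.subset hkv)
      have heq : kv0.2 = m := le_antisymm hm_le hle_m
      show (((kv0 :: rest).filter
          (fun kv => decide (2 ≤ kv.2 ∧ ((kv0 :: rest).headD ("", 0)).2 = kv.2))).map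
          (fun kv => kv.1)).Perm
        (if 2 ≤ m then
          ((dB orders c).items.filter (fun kv => decide (kv.2 = m))).map (fun kv => kv.1)
        else [])
      by_cases h2m : 2 ≤ m
      · rw [if_pos h2m]
        have hfc : ((dB orders c).items.filter
            (fun kv => decide (2 ≤ kv.2 ∧ ((kv0 :: rest).headD ("", 0)).2 = kv.2)))
            = ((dB orders c).items.filter (fun kv => decide (kv.2 = m))) := by
          apply List.filter_congr
          intro kv _
          simp only [List.headD_cons, decide_eq_decide]
          constructor
          · rintro ⟨_, hkv2⟩
            omega
          · intro hkv2
            omega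
        exact ((hpermKV.trans hitems).filter _).trans (hfc ▸ List.Perm.refl _) |>.map _
      · rw [if_neg h2m]
        have : ((kv0 :: rest).filter
            (fun kv => decide (2 ≤ kv.2 ∧ ((kv0 :: rest).headD ("", 0)).2 = kv.2))) = [] := by
          rw [List.filter_eq_nil_iff]
          intro kv hkv
          have := h0 kv (hpermKV.subset hkv)
          simp only [List.headD_cons, decide_eq_true_eq]
          omega
        rw [this]
        rfl
  · unfold selA selB
    rw [if_neg (by omega), tmpLA_of_nonpos orders c (by omega)]
    rfl

-- ===== VERDICT (by name: the statement is the Claim_ definition above) =====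
theorem solution_spec : Claim_equal_solution := by
  intro orders course _
  unfold Spec_solution
  rw [solution_eq, solution_alt_eq]
  exact PySem.List.sorted_eq_sorted_of_perm _ _ _ (fun a b h => h)
    (List.Perm.flatMap_left course (fun c _ => selA_perm_selB orders c))
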